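-- pv_equiv track=rewrite | github.com/Ashwathama2024/KRAM | backend/app/services/staff_naming.py | _tail_letter
-- ===== SOURCE A (Python) =====
-- from typing import Iterable, Optional
--
-- def _tail_letter(token: str) -> Optional[str]:
--     for index in range(len(token) - 1, -1, -1):
--         char = token[index]
--         if char in "AEIOU":
--             continue
--         if char == "H" and index > 0:
--             continue
--         return char
--     return token[-1] if token else None
-- ===== SOURCE B (Python) =====
-- from typing import Optional
--
-- def _tail_letter(token: str) -> Optional[str]:
--     trimmed = token[1:].rstrip("AEIOUH")
--     if trimmed:
--         return trimmed[-1]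
--     if not token:
--         return None
--     return token[0] if token[0] not in "AEIOU" else token[-1]
-- ===== Notes on version B (the rewrite author's own statement) =====
-- stated objective: idiomatic
-- what changed: Replaces the explicit reverse index loop with skip-continues by a trailing rstrip of the vowel-and-H character set on the tail of the token plus a small head-character / all-vowel fallback branch.
import Mathlib
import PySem

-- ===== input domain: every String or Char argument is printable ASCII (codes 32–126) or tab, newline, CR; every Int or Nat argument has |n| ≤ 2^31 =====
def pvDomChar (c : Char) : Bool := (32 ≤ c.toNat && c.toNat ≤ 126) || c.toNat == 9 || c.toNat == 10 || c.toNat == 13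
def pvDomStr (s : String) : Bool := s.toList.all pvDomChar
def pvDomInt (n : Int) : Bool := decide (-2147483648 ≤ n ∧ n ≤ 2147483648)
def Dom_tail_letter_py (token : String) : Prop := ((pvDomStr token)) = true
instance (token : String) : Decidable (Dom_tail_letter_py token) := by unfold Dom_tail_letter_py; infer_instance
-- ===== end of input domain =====

-- B replaces A's explicit reverse index loop by a trailing strip of "AEIOUH" on token[1:] plus a
-- two-branch head/last fallback (objective: idiomatic); same return value everywhere.

-- ===== PORT A =====
-- the for-loop over range(len(token)-1, -1, -1): n counts the indices still to visit, current index is n-1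
def pvALoop : List Char → Nat → Option Char
  | _, 0 => none
  | cs, n + 1 =>
    if cs.getD n ' ' ∈ ['A', 'E', 'I', 'O', 'U'] then pvALoop cs n
    else if cs.getD n ' ' = 'H' ∧ n > 0 then pvALoop cs n
    else some (cs.getD n ' ')

def tail_letter_py (token : String) : Option String :=
  match pvALoop token.toList token.toList.length with
  | some c => some (String.ofList [c])
  | none =>
    -- return token[-1] if token else None
    match token.toList.getLast? with
    | some c => some (String.ofList [c])
    | none => none

-- ===== PORT B =====
def tail_letter_py_alt (token : String) : Option String :=
  -- trimmed = token[1:].rstrip("AEIOUH"); rstrip over a char set ported by hand (exact): reverse, dropWhile membership, reverse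
  match (((token.toList.drop 1).reverse.dropWhile (fun c => c ∈ ['A', 'E', 'I', 'O', 'U', 'H'])).reverse).getLast? with
  | some d => some (String.ofList [d])
  | none =>
    match token.toList with
    | [] => none
    | c0 :: _ =>
      if c0 ∈ ['A', 'E', 'I', 'O', 'U'] then token.toList.getLast?.map (fun c => String.ofList [c])
      else some (String.ofList [c0])

-- ===== PRECONDITION & SPEC =====
def Spec_tail_letter_py (token : String) (out : Option String) : Prop := out = tail_letter_py_alt token
instance (token : String) (out : Option String) : Decidable (Spec_tail_letter_py token out) := by unfold Spec_tail_letter_py; infer_instance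

-- ===== CLAIM (what is proved, stated in full; the proofs are below) =====
def Claim_equal_tail_letter_py : Prop := ∀ (token : String), Dom_tail_letter_py token → Spec_tail_letter_py token (tail_letter_py token)

-- ===== LEMMAS AND PROOFS =====

-- A's loop, re-read as structural recursion on the reversed prefix it still has to visit
def pvGo : List Char → Option Char
  | [] => none
  | c :: rest =>
    if c ∈ ['A', 'E', 'I', 'O', 'U'] then pvGo rest
    else if c = 'H' ∧ rest ≠ [] then pvGo rest
    else some c

theorem pvALoop_eq_pvGo (cs : List Char) :
    ∀ n, n ≤ cs.length → pvALoop cs n = pvGo ((cs.take n).reverse) := by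
  intro n
  induction n with
  | zero => intro _; simp [pvALoop, pvGo]
  | succ n ih =>
    intro h
    have hn : n < cs.length := by omega
    have hget : cs.getD n ' ' = cs[n] := by
      simp [List.getD_eq_getElem?_getD, hn]
    have htake : (cs.take (n + 1)).reverse = cs[n] :: (cs.take n).reverse := by
      rw [List.take_add_one]
      simp [hn]
    have hlen : ((cs.take n).reverse).length = n := by simp [min_eq_left hn.le]
    have hrest : ((cs.take n).reverse ≠ []) ↔ 0 < n := by
      rw [← List.length_pos_iff, hlen]
    rw [htake]
    show pvALoop cs (n + 1) = pvGo (cs[n] :: (cs.take n).reverse)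
    rw [show pvALoop cs (n + 1) =
        (if cs.getD n ' ' ∈ ['A', 'E', 'I', 'O', 'U'] then pvALoop cs n
         else if cs.getD n ' ' = 'H' ∧ n > 0 then pvALoop cs n
         else some (cs.getD n ' ')) from rfl,
       show pvGo (cs[n] :: (cs.take n).reverse) =
        (if cs[n] ∈ ['A', 'E', 'I', 'O', 'U'] then pvGo ((cs.take n).reverse)
         else if cs[n] = 'H' ∧ (cs.take n).reverse ≠ [] then pvGo ((cs.take n).reverse)
         else some cs[n]) from rfl,
       hget]
    by_cases h1 : cs[n] ∈ ['A', 'E', 'I', 'O', 'U']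
    · rw [if_pos h1, if_pos h1, ih (by omega)]
    · rw [if_neg h1, if_neg h1]
      by_cases h2 : cs[n] = 'H' ∧ 0 < n
      · rw [if_pos h2, if_pos ⟨h2.1, hrest.mpr h2.2⟩, ih (by omega)]
      · rw [if_neg h2, if_neg (fun hc => h2 ⟨hc.1, hrest.mp hc.2⟩)]

theorem pvGo_append (c0 : Char) :
    ∀ xs : List Char,
      pvGo (xs ++ [c0]) =
        match xs.dropWhile (fun c => c ∈ ['A', 'E', 'I', 'O', 'U', 'H']) with
        | d :: _ => some d
        | [] => pvGo [c0] := by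
  intro xs
  induction xs with
  | nil => simp
  | cons x xs ih =>
    by_cases hx : x ∈ ['A', 'E', 'I', 'O', 'U', 'H']
    · have hxd : x = 'A' ∨ x = 'E' ∨ x = 'I' ∨ x = 'O' ∨ x = 'U' ∨ x = 'H' := by
        simpa using hx
      have hstep : pvGo ((x :: xs) ++ [c0]) = pvGo (xs ++ [c0]) := by
        rcases hxd with h | h | h | h | h | h <;> subst h <;> simp [pvGo]
      rw [show (x :: xs) ++ [c0] = x :: (xs ++ [c0]) from rfl] at hstep
      rw [List.cons_append, hstep, ih, List.dropWhile_cons,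
          if_pos (show (fun c => decide (c ∈ ['A', 'E', 'I', 'O', 'U', 'H'])) x = true by simpa using hx)]
    · have hv : x ∉ ['A', 'E', 'I', 'O', 'U'] := by
        intro h; apply hx; simp at h ⊢; tauto
      have hH : x ≠ 'H' := by
        intro h; exact hx (by simp [h])
      have hstop : pvGo (x :: (xs ++ [c0])) = some x := by
        rw [show pvGo (x :: (xs ++ [c0])) =
            (if x ∈ ['A', 'E', 'I', 'O', 'U'] then pvGo (xs ++ [c0])
             else if x = 'H' ∧ (xs ++ [c0]) ≠ [] then pvGo (xs ++ [c0])
             else some x) from rfl,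
           if_neg hv, if_neg (fun hc => hH hc.1)]
      rw [List.cons_append, hstop, List.dropWhile_cons,
          if_neg (show ¬ (fun c => decide (c ∈ ['A', 'E', 'I', 'O', 'U', 'H'])) x = true by simpa using hx)]

-- ===== VERDICT (by name: the statement is the Claim_ definition above) =====
theorem tail_letter_py_spec : Claim_equal_tail_letter_py := by
  intro token _
  unfold Spec_tail_letter_py tail_letter_py tail_letter_py_alt
  cases hcs : token.toList with
  | nil => simp [pvALoop]
  | cons c0 t =>
    have hA : pvALoop (c0 :: t) (c0 :: t).length = pvGo (t.reverse ++ [c0]) := by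
      rw [pvALoop_eq_pvGo (c0 :: t) (c0 :: t).length (le_refl _)]
      simp
    rw [hA, pvGo_append]
    simp only [List.drop_one, List.tail_cons, List.getLast?_reverse]
    cases hdw : t.reverse.dropWhile (fun c => c ∈ ['A', 'E', 'I', 'O', 'U', 'H']) with
    | cons d r => simp
    | nil =>
      simp only [List.head?_nil]
      by_cases hv : c0 ∈ ['A', 'E', 'I', 'O', 'U']
      · rw [show pvGo [c0] = (if c0 ∈ ['A', 'E', 'I', 'O', 'U'] then pvGo ([] : List Char)
             else if c0 = 'H' ∧ ([] : List Char) ≠ [] then pvGo ([] : List Char)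
             else some c0) from rfl, if_pos hv]
        simp only [pvGo, hv, if_pos]
        cases (c0 :: t).getLast? <;> rfl
      · rw [show pvGo [c0] = (if c0 ∈ ['A', 'E', 'I', 'O', 'U'] then pvGo ([] : List Char)
             else if c0 = 'H' ∧ ([] : List Char) ≠ [] then pvGo ([] : List Char)
             else some c0) from rfl, if_neg hv, if_neg (by simp)]
        simp [hv]
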